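-- pv_equiv track=rewrite | github.com/AnnaGrBio/GetFungiCoverage | Part3_Pg7_AccessGenesDensity.py | make_list_chromosomes
-- ===== SOURCE A (Python) =====
-- def sort_liste(Liste):
--     NewListe = []
--     for i in Liste:
--         Place = False
--         for j in range(len(NewListe)):
--             Other = NewListe[j]
--             if Other >= i:
--                 NewListe.insert(j,i)
--                 Place = True
--                 break
--         if Place == False:
--             NewListe.append(i)
--     return NewListe
--
-- def make_list_chromosomes(File):
--     Liste2L = []
--     Liste2R = []
--     Liste3L = []
--     Liste3R = []
--     Liste4 = []
--     ListeX = []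
--     ListeY = []
--     for i in File[2:]:
--         ligne = i.split("	")
--         if "2L_Chromosome" in ligne:
--             if len(ligne)>8:
--                 if "ID=gene" in ligne[8]:
--                     Start = int(ligne[3])
--                     Liste2L.append(Start)
--         if "2R_Chromosome" in ligne:
--             if len(ligne)>8:
--                 if "ID=gene" in ligne[8]:
--                     Start = int(ligne[3])
--                     Liste2R.append(Start)
--         if "3L_Chromosome" in ligne:
--             if len(ligne)>8:
--                 if "ID=gene" in ligne[8]:
--                     Start = int(ligne[3])
--                     Liste3L.append(Start)
--         if "3R_Chromosome" in ligne:
--             if len(ligne)>8: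
--                 if "ID=gene" in ligne[8]:
--                     Start = int(ligne[3])
--                     Liste3R.append(Start)
--         if "4_Chromosome" in ligne:
--             if len(ligne)>8:
--                 if "ID=gene" in ligne[8]:
--                     Start = int(ligne[3])
--                     Liste4.append(Start)
--         if "X_Chromosome" in ligne:
--             if len(ligne)>8:
--                 if "ID=gene" in ligne[8]:
--                     Start = int(ligne[3])
--                     ListeX.append(Start)
--         if "Y_Chromosome" in ligne:
--             if len(ligne)>8:
--                 if "ID=gene" in ligne[8]:
--                     Start = int(ligne[3])
--                     ListeY.append(Start)
--     NewListe2L = sort_liste(Liste2L)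
--     NewListe2R = sort_liste(Liste2R)
--     NewListe3L = sort_liste(Liste3L)
--     NewListe3R = sort_liste(Liste3R)
--     NewListe4 = sort_liste(Liste4)
--     NewListeX = sort_liste(ListeX)
--     NewListeY = sort_liste(ListeY)
--     Dico = {"2L_Chromosome":NewListe2L,"2R_Chromosome":NewListe2R,"3L_Chromosome":NewListe3L,"3R_Chromosome":NewListe3R,"4_Chromosome":NewListe4,"X_Chromosome":NewListeX,"Y_Chromosome":NewListeY}
--     return Dico
-- ===== SOURCE B (Python) =====
-- CHROM_NAMES = ["2L_Chromosome", "2R_Chromosome", "3L_Chromosome", "3R_Chromosome",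
--                "4_Chromosome", "X_Chromosome", "Y_Chromosome"]
--
-- def make_list_chromosomes(File):
--     buckets = {name: [] for name in CHROM_NAMES}
--     for line in File[2:]:
--         ligne = line.split("\t")
--         if len(ligne) > 8 and "ID=gene" in ligne[8]:
--             for name in CHROM_NAMES:
--                 if name in ligne:
--                     buckets[name].append(int(ligne[3]))
--     return {name: sorted(starts) for name, starts in buckets.items()}
-- ===== Notes on version B (the rewrite author's own statement) =====
-- stated objective: simpler
-- what changed: Replaces the seven copy-pasted accumulator branches and the hand-written quadratic insertion sort by one data-driven pass that groups starts into a name-keyed dict of buckets (testing all seven names independently per qualifying line) followed by built-in sorted() per bucket.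
import Mathlib
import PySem

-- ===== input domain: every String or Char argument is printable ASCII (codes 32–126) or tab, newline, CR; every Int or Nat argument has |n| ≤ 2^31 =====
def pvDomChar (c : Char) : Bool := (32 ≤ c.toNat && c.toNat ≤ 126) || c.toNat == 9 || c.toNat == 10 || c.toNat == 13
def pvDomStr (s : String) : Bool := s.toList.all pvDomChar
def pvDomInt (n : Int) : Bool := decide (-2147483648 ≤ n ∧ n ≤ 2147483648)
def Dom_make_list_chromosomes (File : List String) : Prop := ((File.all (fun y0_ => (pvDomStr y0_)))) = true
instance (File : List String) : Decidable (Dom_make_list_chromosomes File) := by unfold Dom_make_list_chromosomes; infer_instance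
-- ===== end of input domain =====

-- B replaces A's seven copy-pasted accumulator branches and hand-written insertion sort by one
-- data-driven grouping pass over a name-keyed dict followed by built-in sorted() (objective: simpler).

-- ===== PORT A =====
-- inner loop of sort_liste: scan NewListe for the first element >= i and insert before it,
-- else (Place stays False) append at the end
def sl_insert (i : Int) : List Int → List Int
  | [] => [i]
  | x :: xs => if x ≥ i then i :: x :: xs else x :: sl_insert i xs

def sort_liste (Liste : List Int) : List Int :=
  Liste.foldl (fun NewListe i => sl_insert i NewListe) []

-- seven independent (non-elif) branches of A's main loop, one `let` per Python `if` block
def stepA (st : List Int × List Int × List Int × List Int × List Int × List Int × List Int)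
    (i : String) : List Int × List Int × List Int × List Int × List Int × List Int × List Int :=
  let ligne := (PySem.Str.split? i "\t").getD []
  let Start := (PySem.Int.ofStr? (PySem.List.pyGetD ligne 3 "")).getD 0   -- int(ligne[3]); Pre_ keeps it parseable when reached
  let ok := 8 < ligne.length ∧ PySem.Str.isIn "ID=gene" (PySem.List.pyGetD ligne 8 "") = true
  let ⟨l2L, l2R, l3L, l3R, l4, lX, lY⟩ := st
  let l2L := if "2L_Chromosome" ∈ ligne then (if ok then l2L ++ [Start] else l2L) else l2L
  let l2R := if "2R_Chromosome" ∈ ligne then (if ok then l2R ++ [Start] else l2R) else l2R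
  let l3L := if "3L_Chromosome" ∈ ligne then (if ok then l3L ++ [Start] else l3L) else l3L
  let l3R := if "3R_Chromosome" ∈ ligne then (if ok then l3R ++ [Start] else l3R) else l3R
  let l4  := if "4_Chromosome"  ∈ ligne then (if ok then l4  ++ [Start] else l4)  else l4
  let lX  := if "X_Chromosome"  ∈ ligne then (if ok then lX  ++ [Start] else lX)  else lX
  let lY  := if "Y_Chromosome"  ∈ ligne then (if ok then lY  ++ [Start] else lY)  else lY
  (l2L, l2R, l3L, l3R, l4, lX, lY)

def make_list_chromosomes (File : List String) : List (String × List Int) :=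
  let st := (PySem.List.slice File (some 2) none).foldl stepA ([], [], [], [], [], [], [])
  [("2L_Chromosome", sort_liste st.1), ("2R_Chromosome", sort_liste st.2.1),
   ("3L_Chromosome", sort_liste st.2.2.1), ("3R_Chromosome", sort_liste st.2.2.2.1),
   ("4_Chromosome", sort_liste st.2.2.2.2.1), ("X_Chromosome", sort_liste st.2.2.2.2.2.1),
   ("Y_Chromosome", sort_liste st.2.2.2.2.2.2)]

-- ===== PORT B =====
def chrom_names : List String :=
  ["2L_Chromosome", "2R_Chromosome", "3L_Chromosome", "3R_Chromosome",
   "4_Chromosome", "X_Chromosome", "Y_Chromosome"]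

def stepB (d : PySem.Dict String (List Int)) (line : String) : PySem.Dict String (List Int) :=
  let ligne := (PySem.Str.split? line "\t").getD []
  if 8 < ligne.length ∧ PySem.Str.isIn "ID=gene" (PySem.List.pyGetD ligne 8 "") = true then
    chrom_names.foldl (fun d n =>
      if n ∈ ligne then
        d.modify n [] (fun b => b ++ [(PySem.Int.ofStr? (PySem.List.pyGetD ligne 3 "")).getD 0])
      else d) d
  else d

def make_list_chromosomes_alt (File : List String) : List (String × List Int) :=
  let buckets0 := chrom_names.foldl (fun d n => d.insert n ([] : List Int)) PySem.Dict.empty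
  let buckets := (PySem.List.slice File (some 2) none).foldl stepB buckets0
  buckets.items.map (fun p => (p.1, PySem.List.sorted p.2 (fun x => x)))

-- ===== PRECONDITION & SPEC =====
-- Pre_ excludes exactly the files where a gene-qualifying line whose split contains a chromosome
-- name has a non-integer field 3, on which Python's int() raises ValueError in both programs.
def Pre_make_list_chromosomes (File : List String) : Prop :=
  ∀ s ∈ (PySem.List.slice File (some 2) none),
    (8 < ((PySem.Str.split? s "\t").getD []).length ∧
     PySem.Str.isIn "ID=gene" (PySem.List.pyGetD ((PySem.Str.split? s "\t").getD []) 8 "") = true ∧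
     (∃ n ∈ chrom_names, n ∈ (PySem.Str.split? s "\t").getD [])) →
    (PySem.Int.ofStr? (PySem.List.pyGetD ((PySem.Str.split? s "\t").getD []) 3 "")).isSome = true
instance (File : List String) : Decidable (Pre_make_list_chromosomes File) := by
  unfold Pre_make_list_chromosomes; infer_instance

def pvWitness_make_list_chromosomes : List String :=
  ["##gff-version 3", "# header",
   "2L_Chromosome\tsrc\tgene\t7\t100\t.\t+\t.\tID=gene1",
   "X_Chromosome\tsrc\tgene\t3\t50\t.\t-\t.\tID=gene2"]

def Spec_make_list_chromosomes (File : List String) (out : List (String × List Int)) : Prop := out = make_list_chromosomes_alt File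
instance (File : List String) (out : List (String × List Int)) : Decidable (Spec_make_list_chromosomes File out) := by unfold Spec_make_list_chromosomes; infer_instance

-- ===== CLAIM (what is proved, stated in full; the proofs are below) =====
def Claim_equal_make_list_chromosomes : Prop := ∀ (File : List String), Dom_make_list_chromosomes File → Pre_make_list_chromosomes File → Spec_make_list_chromosomes File (make_list_chromosomes File)

-- ===== LEMMAS AND PROOFS =====

-- the dict B maintains, written out by A's seven components
def dictOf (st : List Int × List Int × List Int × List Int × List Int × List Int × List Int) :
    PySem.Dict String (List Int) :=
  PySem.Dict.mk [("2L_Chromosome", st.1), ("2R_Chromosome", st.2.1),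
    ("3L_Chromosome", st.2.2.1), ("3R_Chromosome", st.2.2.2.1),
    ("4_Chromosome", st.2.2.2.2.1), ("X_Chromosome", st.2.2.2.2.2.1),
    ("Y_Chromosome", st.2.2.2.2.2.2)]

theorem condmod1 (la lb lc ld le lf lg : List Int) (fn : List Int → List Int) (p : Prop) [Decidable p] :
    (if p then (dictOf (la, lb, lc, ld, le, lf, lg)).modify "2L_Chromosome" [] fn else dictOf (la, lb, lc, ld, le, lf, lg)) =
      dictOf ((if p then fn la else la), lb, lc, ld, le, lf, lg) := by
  split_ifs with hp
  · simp [dictOf, PySem.Dict.modify, PySem.Dict.insert, PySem.Dict.getD, PySem.Dict.get?, PySem.Dict.contains]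
  · rfl

theorem condmod2 (la lb lc ld le lf lg : List Int) (fn : List Int → List Int) (p : Prop) [Decidable p] :
    (if p then (dictOf (la, lb, lc, ld, le, lf, lg)).modify "2R_Chromosome" [] fn else dictOf (la, lb, lc, ld, le, lf, lg)) =
      dictOf (la, (if p then fn lb else lb), lc, ld, le, lf, lg) := by
  split_ifs with hp
  · simp [dictOf, PySem.Dict.modify, PySem.Dict.insert, PySem.Dict.getD, PySem.Dict.get?, PySem.Dict.contains]
  · rfl

theorem condmod3 (la lb lc ld le lf lg : List Int) (fn : List Int → List Int) (p : Prop) [Decidable p] :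
    (if p then (dictOf (la, lb, lc, ld, le, lf, lg)).modify "3L_Chromosome" [] fn else dictOf (la, lb, lc, ld, le, lf, lg)) =
      dictOf (la, lb, (if p then fn lc else lc), ld, le, lf, lg) := by
  split_ifs with hp
  · simp [dictOf, PySem.Dict.modify, PySem.Dict.insert, PySem.Dict.getD, PySem.Dict.get?, PySem.Dict.contains]
  · rfl

theorem condmod4 (la lb lc ld le lf lg : List Int) (fn : List Int → List Int) (p : Prop) [Decidable p] :
    (if p then (dictOf (la, lb, lc, ld, le, lf, lg)).modify "3R_Chromosome" [] fn else dictOf (la, lb, lc, ld, le, lf, lg)) =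
      dictOf (la, lb, lc, (if p then fn ld else ld), le, lf, lg) := by
  split_ifs with hp
  · simp [dictOf, PySem.Dict.modify, PySem.Dict.insert, PySem.Dict.getD, PySem.Dict.get?, PySem.Dict.contains]
  · rfl

theorem condmod5 (la lb lc ld le lf lg : List Int) (fn : List Int → List Int) (p : Prop) [Decidable p] :
    (if p then (dictOf (la, lb, lc, ld, le, lf, lg)).modify "4_Chromosome" [] fn else dictOf (la, lb, lc, ld, le, lf, lg)) =
      dictOf (la, lb, lc, ld, (if p then fn le else le), lf, lg) := by
  split_ifs with hp
  · simp [dictOf, PySem.Dict.modify, PySem.Dict.insert, PySem.Dict.getD, PySem.Dict.get?, PySem.Dict.contains]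
  · rfl

theorem condmod6 (la lb lc ld le lf lg : List Int) (fn : List Int → List Int) (p : Prop) [Decidable p] :
    (if p then (dictOf (la, lb, lc, ld, le, lf, lg)).modify "X_Chromosome" [] fn else dictOf (la, lb, lc, ld, le, lf, lg)) =
      dictOf (la, lb, lc, ld, le, (if p then fn lf else lf), lg) := by
  split_ifs with hp
  · simp [dictOf, PySem.Dict.modify, PySem.Dict.insert, PySem.Dict.getD, PySem.Dict.get?, PySem.Dict.contains]
  · rfl

theorem condmod7 (la lb lc ld le lf lg : List Int) (fn : List Int → List Int) (p : Prop) [Decidable p] :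
    (if p then (dictOf (la, lb, lc, ld, le, lf, lg)).modify "Y_Chromosome" [] fn else dictOf (la, lb, lc, ld, le, lf, lg)) =
      dictOf (la, lb, lc, ld, le, lf, (if p then fn lg else lg)) := by
  split_ifs with hp
  · simp [dictOf, PySem.Dict.modify, PySem.Dict.insert, PySem.Dict.getD, PySem.Dict.get?, PySem.Dict.contains]
  · rfl


theorem stepB_dictOf (st : List Int × List Int × List Int × List Int × List Int × List Int × List Int)
    (line : String) : stepB (dictOf st) line = dictOf (stepA st line) := by
  obtain ⟨la, lb, lc, ld, le, lf, lg⟩ := st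
  simp only [stepB, stepA, chrom_names, List.foldl_cons, List.foldl_nil]
  by_cases hok : 8 < ((PySem.Str.split? line "\t").getD []).length ∧
      PySem.Str.isIn "ID=gene" (PySem.List.pyGetD ((PySem.Str.split? line "\t").getD []) 8 "") = true
  · rw [if_pos hok, condmod1, condmod2, condmod3, condmod4, condmod5, condmod6, condmod7]
    simp only [if_pos hok]
  · rw [if_neg hok]
    simp only [if_neg hok, ite_self]

theorem fold_dictOf (ls : List String)
    (st : List Int × List Int × List Int × List Int × List Int × List Int × List Int) :
    ls.foldl stepB (dictOf st) = dictOf (ls.foldl stepA st) := by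
  induction ls generalizing st with
  | nil => rfl
  | cons l ls ih => simp only [List.foldl_cons, stepB_dictOf, ih]

theorem sl_insert_eq (i : Int) (l : List Int) :
    sl_insert i l = List.orderedInsert (· ≤ ·) i l := by
  induction l with
  | nil => rfl
  | cons x xs ih => simp only [sl_insert, List.orderedInsert, ge_iff_le, ih]

theorem sort_liste_aux (l acc : List Int) (h : acc.Pairwise (· ≤ ·)) :
    (l.foldl (fun a i => sl_insert i a) acc).Pairwise (· ≤ ·) ∧
      (l.foldl (fun a i => sl_insert i a) acc).Perm (acc ++ l) := by
  induction l generalizing acc with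
  | nil => exact ⟨h, by simp⟩
  | cons x l ih =>
    obtain ⟨hp, hperm⟩ := ih (sl_insert x acc) (by rw [sl_insert_eq]; exact List.Pairwise.orderedInsert x acc h)
    have h1 : (sl_insert x acc).Perm (x :: acc) := by
      rw [sl_insert_eq]; exact List.perm_orderedInsert _ x acc
    exact ⟨hp, hperm.trans ((h1.append_right l).trans List.perm_middle.symm)⟩

theorem sort_liste_eq (l : List Int) :
    PySem.List.sorted l (fun x => x) = sort_liste l := by
  obtain ⟨hp, hperm⟩ := sort_liste_aux l [] (by simp)
  exact PySem.List.sorted_id_eq_of_perm_of_pairwise l _ (by simpa using hperm) hp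

theorem buckets0_eq : chrom_names.foldl (fun d n => d.insert n ([] : List Int)) PySem.Dict.empty
    = dictOf ([], [], [], [], [], [], []) := by decide

theorem make_list_chromosomes_spec' (File : List String) :
    make_list_chromosomes File = make_list_chromosomes_alt File := by
  simp only [make_list_chromosomes, make_list_chromosomes_alt, buckets0_eq, fold_dictOf]
  simp [dictOf, sort_liste_eq]

-- ===== VERDICT (by name: the statement is the Claim_ definition above) =====
theorem make_list_chromosomes_spec : Claim_equal_make_list_chromosomes := by
  intro File _ _
  exact (make_list_chromosomes_spec' File).symm ▸ rfl
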